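-- pv_equiv track=rewrite | github.com/JoyfulRusty/rlcards-rs | lq_rlcard_new-develop/lq_rlcard/rlcards/games/doudizhu/judge.py | chain_indexes
-- ===== SOURCE A (Python) =====
-- def chain_indexes(indexes_list):
-- 	"""
-- 	使用indexes_list查找单人、双人和三人组的链
-- 	:param indexes_list: 具有相同点数的卡片的索引，点数可以是1、2 或 3
-- 	:return:  [(start_index1, length1), (start_index1, length1), ...]
-- 	"""
-- 	chains = []
-- 	prev_index = -100
-- 	count = 0
-- 	start = None
-- 	for i in indexes_list:
-- 		if (i[0] >= 12):  # no chains for '2BR'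
-- 			break
-- 		if (i[0] == prev_index + 1):
-- 			count += 1
-- 		else:
-- 			if (count > 1):
-- 				chains.append((start, count))
-- 			count = 1
-- 			start = i[0]
-- 		prev_index = i[0]
-- 	if (count > 1):
-- 		chains.append((start, count))
-- 	return chains
-- ===== SOURCE B (Python) =====
-- def chain_indexes(indexes_list):
--     # Different decomposition: first extract the value prefix before the first
--     # value >= 12, then scan it run-by-run with two index pointers, emitting
--     # each maximal consecutive run of length > 1.
--     vals = []
--     for i in indexes_list:
--         if i[0] >= 12:
--             break
--         vals.append(i[0])
--     res = []
--     k, n = 0, len(vals)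
--     while k < n:
--         j = k + 1
--         while j < n and vals[j] == vals[j - 1] + 1:
--             j += 1
--         if j - k > 1:
--             res.append((vals[k], j - k))
--         k = j
--     return res
-- ===== Notes on version B (the rewrite author's own statement) =====
-- stated objective: alternative
-- what changed: Replaces A's single-pass state machine (prev/count/start accumulators with a sentinel prev_index=-100 and a trailing flush) by a two-phase decomposition: extract the value prefix before the first value >= 12, then scan it with two index pointers measuring each maximal consecutive run and emitting runs of length > 1.
-- outside the precondition, e.g. on chain_indexes([(-99, 0), (-98, 0)]): A returns [(None, 2)], B returns [(-99, 2)]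
import Mathlib
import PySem

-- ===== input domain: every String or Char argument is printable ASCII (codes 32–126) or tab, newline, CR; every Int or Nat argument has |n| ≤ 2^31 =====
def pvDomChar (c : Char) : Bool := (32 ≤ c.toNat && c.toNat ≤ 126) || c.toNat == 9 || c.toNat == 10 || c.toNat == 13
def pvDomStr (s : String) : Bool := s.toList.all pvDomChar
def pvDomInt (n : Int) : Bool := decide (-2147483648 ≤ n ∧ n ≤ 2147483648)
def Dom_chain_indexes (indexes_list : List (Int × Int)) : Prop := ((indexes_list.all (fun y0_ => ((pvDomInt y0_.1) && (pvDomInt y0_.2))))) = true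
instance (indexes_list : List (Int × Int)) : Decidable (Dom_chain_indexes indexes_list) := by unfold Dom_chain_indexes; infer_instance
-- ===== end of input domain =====

-- B replaces A's single-pass prev/count/start state machine by a two-phase run scan
-- (extract the prefix of values < 12, then emit each maximal consecutive run of length > 1);
-- objective: alternative decomposition, same cost.


-- ===== PORT A =====
-- 'if count > 1: chains.append((start, count))' — inside Pre_ the appended start is
-- always an actual value (some s); .getD 0 is never the None case there.
def pvFlush (chains : List (Int × Int)) (count : Int) (start : Option Int) : List (Int × Int) :=
  if count > 1 then chains ++ [(start.getD 0, count)] else chains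

def pvLoopA : List (Int × Int) → List (Int × Int) → Int → Int → Option Int → List (Int × Int)
  | [], chains, _, count, start => pvFlush chains count start
  | i :: rest, chains, prev, count, start =>
    if i.1 ≥ 12 then pvFlush chains count start
    else if i.1 = prev + 1 then pvLoopA rest chains i.1 (count + 1) start
    else pvLoopA rest (pvFlush chains count start) i.1 1 (some i.1)

def chain_indexes (indexes_list : List (Int × Int)) : List (Int × Int) :=
  pvLoopA indexes_list [] (-100) 0 none

-- ===== PORT B =====
-- phase 1: the value prefix before the first value >= 12
def pvTakeVals : List (Int × Int) → List Int
  | [] => []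
  | i :: rest => if i.1 ≥ 12 then [] else i.1 :: pvTakeVals rest

-- inner while loop: length of the consecutive extension following value p
def pvRunLen : Int → List Int → Nat
  | _, [] => 0
  | p, v :: r => if v = p + 1 then pvRunLen v r + 1 else 0

-- outer while loop: emit each maximal run, skip past it
def pvGroups : List Int → List (Int × Int)
  | [] => []
  | v :: r =>
    (if ((pvRunLen v r : Int) + 1 > 1) then [(v, (pvRunLen v r : Int) + 1)] else [])
      ++ pvGroups (r.drop (pvRunLen v r))
termination_by l => l.length
decreasing_by simp

def chain_indexes_alt (indexes_list : List (Int × Int)) : List (Int × Int) :=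
  pvGroups (pvTakeVals indexes_list)

-- ===== PRECONDITION & SPEC =====
-- Pre_ excludes lists whose first two values are -99 and -98: there A's run starts off the
-- sentinel prev_index = -100 with start still None, so A returns (None, count), not an int pair.
def Pre_chain_indexes (indexes_list : List (Int × Int)) : Prop :=
  (indexes_list.map Prod.fst).take 2 ≠ [-99, -98]
instance (indexes_list : List (Int × Int)) : Decidable (Pre_chain_indexes indexes_list) := by
  unfold Pre_chain_indexes; infer_instance

def pvWitness_chain_indexes : (List (Int × Int)) := [(3, 0), (4, 1), (5, 2)]

def Spec_chain_indexes (indexes_list : List (Int × Int)) (out : List (Int × Int)) : Prop := out = chain_indexes_alt indexes_list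
instance (indexes_list : List (Int × Int)) (out : List (Int × Int)) : Decidable (Spec_chain_indexes indexes_list out) := by unfold Spec_chain_indexes; infer_instance

-- ===== CLAIM (what is proved, stated in full; the proofs are below) =====
def Claim_equal_chain_indexes : Prop := ∀ (indexes_list : List (Int × Int)), Dom_chain_indexes indexes_list → Pre_chain_indexes indexes_list → Spec_chain_indexes indexes_list (chain_indexes indexes_list)

-- ===== LEMMAS AND PROOFS =====

theorem pvGroups_nil : pvGroups [] = [] := by rw [pvGroups.eq_def]

theorem pvGroups_cons (v : Int) (r : List Int) :
    pvGroups (v :: r) =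
      (if ((pvRunLen v r : Int) + 1 > 1) then [(v, (pvRunLen v r : Int) + 1)] else [])
        ++ pvGroups (r.drop (pvRunLen v r)) := by rw [pvGroups.eq_def]

-- A's loop over the value list only (the break already folded into pvTakeVals)
def pvLoopA' : List Int → List (Int × Int) → Int → Int → Option Int → List (Int × Int)
  | [], chains, _, count, start => pvFlush chains count start
  | v :: rest, chains, prev, count, start =>
    if v = prev + 1 then pvLoopA' rest chains v (count + 1) start
    else pvLoopA' rest (pvFlush chains count start) v 1 (some v)

theorem pvLoopA_eq_loopA' (l : List (Int × Int)) (chains : List (Int × Int))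
    (prev count : Int) (start : Option Int) :
    pvLoopA l chains prev count start = pvLoopA' (pvTakeVals l) chains prev count start := by
  induction l generalizing chains prev count start with
  | nil => rfl
  | cons i rest ih =>
    simp only [pvLoopA, pvTakeVals]
    by_cases h : i.1 ≥ 12
    · simp [h, pvLoopA']
    · simp only [if_neg h, pvLoopA']
      by_cases h2 : i.1 = prev + 1 <;> simp [h2, ih]

-- run invariant: while in a run started at s of current length count (so prev = s+count-1),
-- the loop emits that run (if long enough) and then behaves as pvGroups on the rest
theorem pvLoopA'_run (vals : List Int) (chains : List (Int × Int)) (s count : Int)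
    (h : 1 ≤ count) :
    pvLoopA' vals chains (s + count - 1) count (some s) =
      chains ++ (if count + (pvRunLen (s + count - 1) vals : Int) > 1
                  then [(s, count + (pvRunLen (s + count - 1) vals : Int))] else [])
             ++ pvGroups (vals.drop (pvRunLen (s + count - 1) vals)) := by
  induction vals generalizing chains s count with
  | nil =>
    simp [pvLoopA', pvRunLen, pvFlush, pvGroups_nil]
    split_ifs <;> simp
  | cons v r ih =>
    simp only [pvLoopA']
    by_cases hv : v = (s + count - 1) + 1
    · rw [if_pos hv]
      have hr : pvRunLen (s + count - 1) (v :: r) = pvRunLen v r + 1 := by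
        simp [pvRunLen, hv]
      have h1 : s + (count + 1) - 1 = v := by omega
      have hrun := ih chains s (count + 1) (by omega)
      rw [h1] at hrun
      rw [hrun, hr]
      simp only [List.drop_succ_cons]
      push_cast
      rw [show count + ((pvRunLen v r : Int) + 1) = count + 1 + (pvRunLen v r : Int) by ring]
    · rw [if_neg hv]
      have hr : pvRunLen (s + count - 1) (v :: r) = 0 := by
        simp [pvRunLen]; omega
      have hrun := ih (pvFlush chains count (some s)) v 1 (by omega)
      rw [show v + 1 - 1 = v by omega] at hrun
      rw [hrun, hr]
      simp only [List.drop_zero]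
      rw [pvGroups_cons]
      simp only [pvFlush, Nat.cast_zero, add_zero]
      rw [show (1 : Int) + (pvRunLen v r : Int) = (pvRunLen v r : Int) + 1 by ring]
      split_ifs <;> simp [List.append_assoc]

-- the value prefix determines the first two values of the input
theorem pvTakeVals_prefix2 (l : List (Int × Int)) (v w : Int) (r : List Int)
    (h : pvTakeVals l = v :: w :: r) : (l.map Prod.fst).take 2 = [v, w] := by
  match l with
  | [] => simp [pvTakeVals] at h
  | [x] =>
    simp only [pvTakeVals] at h
    split at h <;> simp_all
  | x :: y :: t =>
    simp only [pvTakeVals] at h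
    split at h
    · simp at h
    · split at h <;> simp_all

-- ===== VERDICT (by name: the statement is the Claim_ definition above) =====
theorem chain_indexes_spec : Claim_equal_chain_indexes := by
  intro l _ hpre
  unfold Spec_chain_indexes chain_indexes chain_indexes_alt
  rw [pvLoopA_eq_loopA']
  rcases hvs : pvTakeVals l with _ | ⟨v, r⟩
  · simp [pvLoopA', pvFlush, pvGroups_nil]
  · simp only [pvLoopA']
    by_cases hv : v = -100 + 1
    · -- v = -99: the first element continues the sentinel run; Pre_ rules out a second -98
      rw [if_pos hv]
      rcases r with _ | ⟨w, r'⟩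
      · simp [pvLoopA', pvFlush, pvGroups_cons, pvRunLen, pvGroups_nil]
      · have hw : w ≠ -98 := by
          intro hweq
          exact hpre (by rw [pvTakeVals_prefix2 l v w r' hvs, hv, hweq]; norm_num)
        simp only [pvLoopA']
        have hww : ¬ (w = v + 1) := by omega
        rw [if_neg hww]
        have hrun := pvLoopA'_run r' (pvFlush [] (0 + 1) none) w 1 (by omega)
        rw [show w + 1 - 1 = w by omega] at hrun
        have hf : pvFlush [] (0 + 1) none = [] := by simp [pvFlush]
        rw [hf] at hrun ⊢
        rw [hrun]
        have hrl : pvRunLen v (w :: r') = 0 := by simp [pvRunLen]; omega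
        rw [pvGroups_cons v (w :: r'), hrl]
        simp only [List.drop_zero]
        rw [pvGroups_cons w r']
        rw [show (1 : Int) + (pvRunLen w r' : Int) = (pvRunLen w r' : Int) + 1 by ring]
        simp
    · rw [if_neg hv]
      have hrun := pvLoopA'_run r (pvFlush [] 0 none) v 1 (by omega)
      rw [show v + 1 - 1 = v by omega] at hrun
      have hf : pvFlush [] 0 none = [] := by simp [pvFlush]
      rw [hf] at hrun ⊢
      rw [hrun, pvGroups_cons]
      rw [show (1 : Int) + (pvRunLen v r : Int) = (pvRunLen v r : Int) + 1 by ring]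
      simp
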